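-- pv_equiv track=rewrite | github.com/TeamVato/Bet-That | backend/scripts/playerprofiler_complete_discovery.py | check_strategy_relevance
-- ===== SOURCE A (Python) =====
-- def check_strategy_relevance(columns):
--     """Check which betting strategies this data supports"""
--     relevance = {
--         'qb_td_strategy': False,
--         'rb_under_strategy': False,
--         'wr_under_strategy': False,
--         'totals_strategy': False,
--         'defensive_stats': False
--     }
--
--     columns_lower = [col.lower() for col in columns]
--
--     # QB TD Strategy needs
--     if any('pass' in col and 'td' in col for col in columns_lower):
--         relevance['qb_td_strategy'] = True
--
--     # RB Under Strategy needs
--     if any('rush' in col and ('yard' in col or 'carry' in col) for col in columns_lower):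
--         relevance['rb_under_strategy'] = True
--
--     # WR Under Strategy needs
--     if any('rec' in col and 'yard' in col for col in columns_lower):
--         relevance['wr_under_strategy'] = True
--
--     # Defensive stats
--     if any('allow' in col or 'against' in col or 'def' in col for col in columns_lower):
--         relevance['defensive_stats'] = True
--
--     return relevance
-- ===== SOURCE B (Python) =====
-- def check_strategy_relevance(columns):
--     """Check which betting strategies this data supports"""
--     qb = rb = wr = de = False
--     for col in columns:
--         c = col.lower()
--         qb = qb or ('pass' in c and 'td' in c)
--         rb = rb or ('rush' in c and ('yard' in c or 'carry' in c))
--         wr = wr or ('rec' in c and 'yard' in c)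
--         de = de or ('allow' in c or 'against' in c or 'def' in c)
--     return {
--         'qb_td_strategy': qb,
--         'rb_under_strategy': rb,
--         'wr_under_strategy': wr,
--         'totals_strategy': False,
--         'defensive_stats': de,
--     }
-- ===== Notes on version B (the rewrite author's own statement) =====
-- stated objective: simpler
-- what changed: Replaces the intermediate lowercased list plus four separate any()-scans and dict mutations with a single pass over the columns maintaining four boolean flags, assembling the dict once at the end.
import Mathlib
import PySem

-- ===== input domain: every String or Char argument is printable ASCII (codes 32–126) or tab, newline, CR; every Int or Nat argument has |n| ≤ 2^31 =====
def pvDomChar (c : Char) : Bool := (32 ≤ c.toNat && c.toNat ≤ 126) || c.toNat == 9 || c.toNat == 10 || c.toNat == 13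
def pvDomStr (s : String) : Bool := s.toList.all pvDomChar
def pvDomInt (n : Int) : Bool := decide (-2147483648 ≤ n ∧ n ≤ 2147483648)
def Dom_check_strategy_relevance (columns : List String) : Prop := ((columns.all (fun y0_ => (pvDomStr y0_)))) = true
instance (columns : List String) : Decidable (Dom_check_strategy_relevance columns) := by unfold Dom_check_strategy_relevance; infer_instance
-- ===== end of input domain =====

-- B replaces the lowercased intermediate list and four any()-scans by one pass keeping four boolean flags (simpler decomposition, same cost).

-- ===== PORT A =====
def check_strategy_relevance (columns : List String) : List (String × Bool) :=
  let relevance : PySem.Dict String Bool := PySem.Dict.ofList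
    [("qb_td_strategy", false), ("rb_under_strategy", false), ("wr_under_strategy", false),
     ("totals_strategy", false), ("defensive_stats", false)]
  let columns_lower := columns.map (fun col => PySem.Str.lower col)
  let relevance := if columns_lower.any (fun col => PySem.Str.isIn "pass" col && PySem.Str.isIn "td" col)
    then relevance.insert "qb_td_strategy" true else relevance
  let relevance := if columns_lower.any (fun col => PySem.Str.isIn "rush" col && (PySem.Str.isIn "yard" col || PySem.Str.isIn "carry" col))
    then relevance.insert "rb_under_strategy" true else relevance
  let relevance := if columns_lower.any (fun col => PySem.Str.isIn "rec" col && PySem.Str.isIn "yard" col)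
    then relevance.insert "wr_under_strategy" true else relevance
  let relevance := if columns_lower.any (fun col => PySem.Str.isIn "allow" col || PySem.Str.isIn "against" col || PySem.Str.isIn "def" col)
    then relevance.insert "defensive_stats" true else relevance
  relevance.items

-- ===== PORT B =====
def check_strategy_relevance_alt (columns : List String) : List (String × Bool) :=
  let st := columns.foldl (fun (s : Bool × Bool × Bool × Bool) col =>
    let c := PySem.Str.lower col
    (s.1 || (PySem.Str.isIn "pass" c && PySem.Str.isIn "td" c),
     s.2.1 || (PySem.Str.isIn "rush" c && (PySem.Str.isIn "yard" c || PySem.Str.isIn "carry" c)),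
     s.2.2.1 || (PySem.Str.isIn "rec" c && PySem.Str.isIn "yard" c),
     s.2.2.2 || (PySem.Str.isIn "allow" c || PySem.Str.isIn "against" c || PySem.Str.isIn "def" c)))
    (false, false, false, false)
  [("qb_td_strategy", st.1), ("rb_under_strategy", st.2.1), ("wr_under_strategy", st.2.2.1),
   ("totals_strategy", false), ("defensive_stats", st.2.2.2)]

-- ===== PRECONDITION & SPEC =====
def Spec_check_strategy_relevance (columns : List String) (out : List (String × Bool)) : Prop := out = check_strategy_relevance_alt columns
instance (columns : List String) (out : List (String × Bool)) : Decidable (Spec_check_strategy_relevance columns out) := by unfold Spec_check_strategy_relevance; infer_instance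

-- ===== CLAIM (what is proved, stated in full; the proofs are below) =====
def Claim_equal_check_strategy_relevance : Prop := ∀ (columns : List String), Dom_check_strategy_relevance columns → Spec_check_strategy_relevance columns (check_strategy_relevance columns)

-- ===== LEMMAS AND PROOFS =====

-- B's combined one-pass fold splits into four independent or-folds, each equal to an any over the lowercased columns.
theorem pv_fold4 (columns : List String) (a b c d : Bool) :
    columns.foldl (fun (s : Bool × Bool × Bool × Bool) col =>
      let ch := PySem.Str.lower col
      (s.1 || (PySem.Str.isIn "pass" ch && PySem.Str.isIn "td" ch),
       s.2.1 || (PySem.Str.isIn "rush" ch && (PySem.Str.isIn "yard" ch || PySem.Str.isIn "carry" ch)),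
       s.2.2.1 || (PySem.Str.isIn "rec" ch && PySem.Str.isIn "yard" ch),
       s.2.2.2 || (PySem.Str.isIn "allow" ch || PySem.Str.isIn "against" ch || PySem.Str.isIn "def" ch)))
      (a, b, c, d)
    = (a || (columns.map (fun col => PySem.Str.lower col)).any (fun col => PySem.Str.isIn "pass" col && PySem.Str.isIn "td" col),
       b || (columns.map (fun col => PySem.Str.lower col)).any (fun col => PySem.Str.isIn "rush" col && (PySem.Str.isIn "yard" col || PySem.Str.isIn "carry" col)),
       c || (columns.map (fun col => PySem.Str.lower col)).any (fun col => PySem.Str.isIn "rec" col && PySem.Str.isIn "yard" col),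
       d || (columns.map (fun col => PySem.Str.lower col)).any (fun col => PySem.Str.isIn "allow" col || PySem.Str.isIn "against" col || PySem.Str.isIn "def" col)) := by
  induction columns generalizing a b c d with
  | nil => simp
  | cons x xs ih =>
      simp only [List.foldl_cons, List.map_cons, List.any_cons]
      rw [ih]
      simp [Bool.or_assoc]

-- A's conditional-insert chain on the literal dict yields the literal item list.
theorem pv_dict_form (A1 A2 A3 A4 : Bool) :
    (let d0 : PySem.Dict String Bool := PySem.Dict.ofList
        [("qb_td_strategy", false), ("rb_under_strategy", false), ("wr_under_strategy", false),
         ("totals_strategy", false), ("defensive_stats", false)]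
     let d1 := if A1 then d0.insert "qb_td_strategy" true else d0
     let d2 := if A2 then d1.insert "rb_under_strategy" true else d1
     let d3 := if A3 then d2.insert "wr_under_strategy" true else d2
     let d4 := if A4 then d3.insert "defensive_stats" true else d3
     d4.items)
    = [("qb_td_strategy", A1), ("rb_under_strategy", A2), ("wr_under_strategy", A3),
       ("totals_strategy", false), ("defensive_stats", A4)] := by
  cases A1 <;> cases A2 <;> cases A3 <;> cases A4 <;> rfl

-- ===== VERDICT (by name: the statement is the Claim_ definition above) =====
theorem check_strategy_relevance_spec : Claim_equal_check_strategy_relevance := by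
  intro columns _
  show check_strategy_relevance columns = check_strategy_relevance_alt columns
  unfold check_strategy_relevance check_strategy_relevance_alt
  rw [pv_fold4]
  simp only [Bool.false_or]
  rw [pv_dict_form]
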